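-- pv_equiv track=rewrite | github.com/telldus/tellstick-server | rf433/src/rf433/ProtocolArctech.py | codeSwitchTuple
-- ===== SOURCE A (Python) =====
-- def codeSwitchTuple(intCode):
-- 	strReturn = ''
-- 	for __i in range(4):
-- 		if intCode & 1:  # Convert 1
-- 			strReturn = strReturn + '$kk$'
-- 		else:  # Convert 0
-- 			strReturn = strReturn + '$k$k'
-- 		intCode = intCode >> 1
-- 	return strReturn
-- ===== SOURCE B (Python) =====
-- # Closed-form 16-entry lookup table: the output depends only on the low nibble,
-- # so the whole encoding is a single index instead of a bit-by-bit loop.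
-- _TABLE = [
--     '$k$k$k$k$k$k$k$k', '$kk$$k$k$k$k$k$k', '$k$k$kk$$k$k$k$k', '$kk$$kk$$k$k$k$k',
--     '$k$k$k$k$kk$$k$k', '$kk$$k$k$kk$$k$k', '$k$k$kk$$kk$$k$k', '$kk$$kk$$kk$$k$k',
--     '$k$k$k$k$k$k$kk$', '$kk$$k$k$k$k$kk$', '$k$k$kk$$k$k$kk$', '$kk$$kk$$k$k$kk$',
--     '$k$k$k$k$kk$$kk$', '$kk$$k$k$kk$$kk$', '$k$k$kk$$kk$$kk$', '$kk$$kk$$kk$$kk$',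
-- ]
--
-- def codeSwitchTuple(intCode):
-- 	return _TABLE[intCode % 16]
-- ===== Notes on version B (the rewrite author's own statement) =====
-- stated objective: simpler
-- what changed: Replaces the bit-by-bit string-accumulation loop over the four low bits with a single index into a fixed 16-entry lookup table keyed by the low nibble (the output depends only on it).
import Mathlib
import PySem

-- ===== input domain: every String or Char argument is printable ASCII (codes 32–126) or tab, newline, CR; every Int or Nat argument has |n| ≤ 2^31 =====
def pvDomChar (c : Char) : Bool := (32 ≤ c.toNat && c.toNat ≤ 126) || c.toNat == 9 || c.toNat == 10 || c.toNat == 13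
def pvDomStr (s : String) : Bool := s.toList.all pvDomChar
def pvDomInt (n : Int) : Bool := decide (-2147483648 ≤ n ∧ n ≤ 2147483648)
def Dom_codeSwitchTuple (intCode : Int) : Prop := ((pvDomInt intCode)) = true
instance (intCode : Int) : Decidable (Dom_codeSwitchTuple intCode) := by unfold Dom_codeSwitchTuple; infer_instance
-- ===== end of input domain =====

-- B replaces A's 4-step bit loop with one index into a fixed 16-entry table keyed by the low nibble (simpler: a single lookup).

-- ===== PORT A =====
def codeSwitchTuple (intCode : Int) : String :=
  ((PySem.List.pyRange 0 4 1).foldl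
    (fun (st : String × Int) _ =>
      (st.1 ++ (if PySem.Int.band st.2 1 ≠ 0 then "$kk$" else "$k$k"), st.2 >>> (1 : Nat)))
    ("", intCode)).1

-- ===== PORT B =====
def pvTable : List String :=
  ["$k$k$k$k$k$k$k$k", "$kk$$k$k$k$k$k$k", "$k$k$kk$$k$k$k$k", "$kk$$kk$$k$k$k$k",
   "$k$k$k$k$kk$$k$k", "$kk$$k$k$kk$$k$k", "$k$k$kk$$kk$$k$k", "$kk$$kk$$kk$$k$k",
   "$k$k$k$k$k$k$kk$", "$kk$$k$k$k$k$kk$", "$k$k$kk$$k$k$kk$", "$kk$$kk$$k$k$kk$",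
   "$k$k$k$k$kk$$kk$", "$kk$$k$k$kk$$kk$", "$k$k$kk$$kk$$kk$", "$kk$$kk$$kk$$kk$"]

def codeSwitchTuple_alt (intCode : Int) : String :=
  PySem.List.pyGetD pvTable (PySem.Int.mod intCode 16) ""

-- ===== PRECONDITION & SPEC =====
def Spec_codeSwitchTuple (intCode : Int) (out : String) : Prop := out = codeSwitchTuple_alt intCode
instance (intCode : Int) (out : String) : Decidable (Spec_codeSwitchTuple intCode out) := by unfold Spec_codeSwitchTuple; infer_instance

-- ===== CLAIM (what is proved, stated in full; the proofs are below) =====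
def Claim_equal_codeSwitchTuple : Prop := ∀ (intCode : Int), Dom_codeSwitchTuple intCode → Spec_codeSwitchTuple intCode (codeSwitchTuple intCode)

-- ===== LEMMAS AND PROOFS =====

theorem pv_main (n : Int) : codeSwitchTuple n = codeSwitchTuple_alt n := by
  unfold codeSwitchTuple codeSwitchTuple_alt
  rw [show PySem.List.pyRange 0 4 1 = [0, 1, 2, 3] from by decide]
  simp only [List.foldl, PySem.Int.band_one,
    PySem.Int.mod_eq_emod_of_pos (by norm_num : (0 : Int) < 2),
    PySem.Int.mod_eq_emod_of_pos (by norm_num : (0 : Int) < 16),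
    Int.shiftRight_eq_div_pow]
  norm_num
  have h0 : n % 2 = n % 16 % 2 := by omega
  have h1 : n / 2 % 2 = n % 16 / 2 % 2 := by omega
  have h2 : n / 2 / 2 % 2 = n % 16 / 2 / 2 % 2 := by omega
  have h3 : n / 2 / 2 / 2 % 2 = n % 16 / 2 / 2 / 2 % 2 := by omega
  have hb : 0 ≤ n % 16 ∧ n % 16 < 16 := by omega
  rw [h0, h1, h2, h3]
  generalize hr : n % 16 = r at hb ⊢
  obtain ⟨hr0, hr16⟩ := hb
  interval_cases r <;> decide

-- ===== VERDICT (by name: the statement is the Claim_ definition above) =====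
theorem codeSwitchTuple_spec : Claim_equal_codeSwitchTuple := by
  intro n _
  exact pv_main n
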